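-- pv_equiv track=rewrite | github.com/AdamZhouSE/pythonHomework | Code/CodeRecords/2671/60767/236760.py | has11
-- ===== SOURCE A (Python) =====
-- def has11(num):
--     while(num>=1):
--         if(num%2==1):
--             num = num>>1
--             if(num%2==1):
--                 return True
--         num = num>>1
--     return False
-- ===== SOURCE B (Python) =====
-- def has11(num):
--     return num >= 1 and (num & (num >> 1)) != 0
-- ===== Notes on version B (the rewrite author's own statement) =====
-- stated objective: alternative
-- what changed: Replaces A's bit-by-bit shift/mod loop with a single bitwise test: num has two adjacent 1 bits iff (num & (num >> 1)) != 0, guarded by num >= 1 as in A's while condition.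
import Mathlib
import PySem

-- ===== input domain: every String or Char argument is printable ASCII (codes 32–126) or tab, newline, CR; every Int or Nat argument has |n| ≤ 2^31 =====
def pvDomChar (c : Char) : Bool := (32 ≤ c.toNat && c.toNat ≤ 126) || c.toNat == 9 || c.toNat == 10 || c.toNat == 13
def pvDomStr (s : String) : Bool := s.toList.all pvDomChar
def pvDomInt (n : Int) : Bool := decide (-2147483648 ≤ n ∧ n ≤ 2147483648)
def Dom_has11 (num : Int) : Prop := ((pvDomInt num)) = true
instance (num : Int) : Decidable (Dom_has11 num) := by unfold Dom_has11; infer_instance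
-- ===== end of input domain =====

-- B replaces A's bit-by-bit shift/mod loop with a single bitwise test (num & (num >> 1)) != 0
-- guarded by num >= 1 (A's while condition); objective: alternative (loop-free bitwise formulation).

-- termination helpers for port A (cited by its decreasing_by)
theorem pvShiftToNat_lt (num : Int) (h : 1 ≤ num) : (num >>> 1).toNat < num.toNat := by
  obtain ⟨m, rfl⟩ := Int.eq_ofNat_of_zero_le (by omega : (0:Int) ≤ num)
  have hc : ((m : Int) >>> 1) = ((m >>> 1 : Nat) : Int) := by exact_mod_cast rfl
  rw [hc]
  simp only [Nat.shiftRight_one, Int.toNat_natCast]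
  omega

theorem pvShift2ToNat_lt (num : Int) (h : 1 ≤ num) : ((num >>> 1) >>> 1).toNat < num.toNat := by
  obtain ⟨m, rfl⟩ := Int.eq_ofNat_of_zero_le (by omega : (0:Int) ≤ num)
  have hm : 1 ≤ m := by exact_mod_cast h
  have hc : ((m : Int) >>> 1) = ((m >>> 1 : Nat) : Int) := by exact_mod_cast rfl
  have hc2 : (((m >>> 1 : Nat) : Int) >>> 1) = ((m >>> 1 >>> 1 : Nat) : Int) := by exact_mod_cast rfl
  rw [hc, hc2]
  simp only [Nat.shiftRight_one, Int.toNat_natCast]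
  omega

-- ===== PORT A =====
def has11 (num : Int) : Bool :=
  if 1 ≤ num then
    if PySem.Int.mod num 2 == 1 then
      if PySem.Int.mod (num >>> 1) 2 == 1 then true
      else has11 ((num >>> 1) >>> 1)
    else has11 (num >>> 1)
  else false
termination_by num.toNat
decreasing_by
  · exact pvShift2ToNat_lt _ (by omega)
  · exact pvShiftToNat_lt _ (by omega)

-- ===== PORT B =====
def has11_alt (num : Int) : Bool :=
  decide (1 ≤ num) && (PySem.Int.band num (num >>> 1) != 0)

-- ===== PRECONDITION & SPEC =====
def Spec_has11 (num : Int) (out : Bool) : Prop := out = has11_alt num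
instance (num : Int) (out : Bool) : Decidable (Spec_has11 num out) := by unfold Spec_has11; infer_instance

-- ===== CLAIM (what is proved, stated in full; the proofs are below) =====
def Claim_equal_has11 : Prop := ∀ (num : Int), Dom_has11 num → Spec_has11 num (has11 num)

-- ===== LEMMAS AND PROOFS =====

-- K n: the number n has two adjacent 1 bits
def pvK (n : Nat) : Prop := ∃ i, n.testBit i ∧ n.testBit (i+1)

theorem pvCast_shift (n : Nat) : ((n : Int) >>> 1) = ((n / 2 : Nat) : Int) := by
  have : ((n : Int) >>> 1) = ((n >>> 1 : Nat) : Int) := by exact_mod_cast rfl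
  rw [this, Nat.shiftRight_one]

theorem pvTestBit_div (n i : Nat) : (n / 2).testBit i = n.testBit (i + 1) := by
  simp [Nat.testBit_succ]

theorem pvLand_ne_zero_iff (n : Nat) : (n &&& (n / 2)) ≠ 0 ↔ pvK n := by
  constructor
  · intro h
    by_contra hK
    apply h
    apply Nat.eq_of_testBit_eq
    intro i
    simp only [Nat.testBit_and, Nat.zero_testBit, pvTestBit_div]
    by_contra hb
    exact hK ⟨i, by
      rcases Bool.eq_false_or_eq_true (n.testBit i) with h1 | h1 <;>
      rcases Bool.eq_false_or_eq_true (n.testBit (i+1)) with h2 | h2 <;>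
      simp [h1, h2] at hb ⊢⟩
  · rintro ⟨i, h1, h2⟩
    intro h0
    have := congrArg (fun x => x.testBit i) h0
    simp [Nat.testBit_and, pvTestBit_div, h1, h2] at this

theorem pvK_step (n : Nat) : pvK n ↔ (n.testBit 0 ∧ n.testBit 1) ∨ pvK (n / 2) := by
  constructor
  · rintro ⟨i, h1, h2⟩
    cases i with
    | zero => exact Or.inl ⟨h1, h2⟩
    | succ j => exact Or.inr ⟨j, by simpa [pvTestBit_div] using h1, by simpa [pvTestBit_div] using h2⟩
  · rintro (⟨h1, h2⟩ | ⟨j, h1, h2⟩)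
    · exact ⟨0, h1, h2⟩
    · exact ⟨j + 1, by simpa [pvTestBit_div] using h1, by simpa [pvTestBit_div] using h2⟩

theorem pvMain (n : Nat) : has11 (n : Int) = true ↔ pvK n := by
  induction n using Nat.strong_induction_on with
  | _ n ih =>
    rcases Nat.eq_zero_or_pos n with rfl | hn
    · rw [has11]
      simp only [Nat.cast_zero]
      norm_num
      rintro ⟨i, h1, _⟩
      simp at h1
    · rw [has11]
      have h1 : (1 : Int) ≤ (n : Int) := by exact_mod_cast hn
      rw [if_pos h1, pvCast_shift]
      have hm : PySem.Int.mod (n : Int) 2 = ((n % 2 : Nat) : Int) := by simp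
      have hm2 : PySem.Int.mod ((n / 2 : Nat) : Int) 2 = ((n / 2 % 2 : Nat) : Int) := by simp
      rcases Nat.mod_two_eq_zero_or_one n with he | ho
      · -- even: loop shifts once
        rw [if_neg (by rw [hm, he]; simp)]
        rw [ih (n / 2) (Nat.div_lt_self hn (by norm_num))]
        rw [pvK_step n]
        have t0 : n.testBit 0 = false := by simp [Nat.testBit_zero, he]
        simp [t0]
      · rw [if_pos (by rw [hm, ho]; simp)]
        rcases Nat.mod_two_eq_zero_or_one (n / 2) with he2 | ho2
        · -- odd, next bit 0: loop shifts twice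
          rw [if_neg (by rw [hm2, he2]; simp), pvCast_shift]
          rw [ih (n / 2 / 2) (lt_of_le_of_lt (Nat.div_le_self _ _) (Nat.div_lt_self hn (by norm_num)))]
          have t1 : n.testBit 1 = false := by
            rw [← pvTestBit_div]; simp [Nat.testBit_zero, he2]
          have s0 : (n / 2).testBit 0 = false := by simp [Nat.testBit_zero, he2]
          rw [pvK_step n, pvK_step (n / 2)]
          simp [t1, s0]
        · -- odd, next bit 1: return True
          rw [if_pos (by rw [hm2, ho2]; simp)]
          simp only [true_iff]
          exact ⟨0, by simp [Nat.testBit_zero, ho], by rw [← pvTestBit_div]; simp [Nat.testBit_zero, ho2]⟩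

theorem pvNeg (num : Int) (h : ¬ 1 ≤ num) : has11 num = false := by
  rw [has11, if_neg h]

-- ===== VERDICT (by name: the statement is the Claim_ definition above) =====
theorem has11_spec : Claim_equal_has11 := by
  intro num _
  unfold Spec_has11 has11_alt
  by_cases h : 1 ≤ num
  · obtain ⟨n, rfl⟩ := Int.eq_ofNat_of_zero_le (by omega : (0:Int) ≤ num)
    rw [pvCast_shift]
    have hb : PySem.Int.band (n : Int) ((n / 2 : Nat) : Int) = ((n &&& n / 2 : Nat) : Int) :=
      PySem.Int.band_natCast n (n / 2)
    rw [hb]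
    have hnz : (((n &&& n / 2 : Nat) : Int) != 0) = decide ((n &&& n / 2) ≠ 0) := by
      rcases Nat.eq_zero_or_pos (n &&& n / 2) with hz | hp
      · simp [hz]
      · simp [Nat.pos_iff_ne_zero.mp hp]
    rw [hnz, decide_eq_true h, Bool.true_and]
    rcases Classical.em (pvK n) with hK | hK
    · rw [(pvMain n).mpr hK, decide_eq_true ((pvLand_ne_zero_iff n).mpr hK)]
    · have hf : has11 (n : Int) = false :=
        Bool.eq_false_iff.mpr (fun hc => hK ((pvMain n).mp hc))
      rw [hf, decide_eq_false (fun hc => hK ((pvLand_ne_zero_iff n).mp hc))]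
  · rw [pvNeg num (by omega), decide_eq_false (by omega), Bool.false_and]
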